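-- pv_equiv track=rewrite | github.com/PRKKILLER/Algorithm_Practice | LeetCode/0780-Reaching Points/main.py | reachingPoints2
-- ===== SOURCE A (Python) =====
-- def reachingPoints2(sx, sy, tx, ty):
--     while sx < tx and sy < ty:
--         if tx < ty:
--             ty %= tx
--         else:
--             tx %= ty
--
--     if sx == tx and sy <= ty and (ty - sy) % sx == 0:
--         return True
--
--     if sy == ty and sx <= tx and (tx - sx) % sy == 0:
--         return True
--
--     return False
-- ===== SOURCE B (Python) =====
-- def reachingPoints2(sx, sy, tx, ty):
--     # Reverse walk from (tx, ty) by single repeated subtractions (slow Euclid)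
--     # instead of modulo jumps; same post-loop reachability checks.
--     while sx < tx and sy < ty:
--         if tx > ty:
--             tx -= ty
--         else:
--             ty -= tx
--     return (sx == tx and sy <= ty and (ty - sy) % sx == 0) or (
--         sy == ty and sx <= tx and (tx - sx) % sy == 0)
-- ===== Notes on version B (the rewrite author's own statement) =====
-- stated objective: alternative
-- what changed: B reverse-walks (tx,ty) toward (sx,sy) by single-step repeated subtraction (slow Euclid) instead of A's modulo jumps, and returns the two reachability checks as one boolean expression instead of an if/return chain.
-- outside the precondition, e.g. on reachingPoints2(-5, 2, 3, 10): A returns False, B returns False; on reachingPoints2(-9, 0, -2, 5): A returns False, B does not finish within the time limit; on reachingPoints2(0, 2, 0, 5): A raises ZeroDivisionError, B raises ZeroDivisionError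
import Mathlib
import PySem

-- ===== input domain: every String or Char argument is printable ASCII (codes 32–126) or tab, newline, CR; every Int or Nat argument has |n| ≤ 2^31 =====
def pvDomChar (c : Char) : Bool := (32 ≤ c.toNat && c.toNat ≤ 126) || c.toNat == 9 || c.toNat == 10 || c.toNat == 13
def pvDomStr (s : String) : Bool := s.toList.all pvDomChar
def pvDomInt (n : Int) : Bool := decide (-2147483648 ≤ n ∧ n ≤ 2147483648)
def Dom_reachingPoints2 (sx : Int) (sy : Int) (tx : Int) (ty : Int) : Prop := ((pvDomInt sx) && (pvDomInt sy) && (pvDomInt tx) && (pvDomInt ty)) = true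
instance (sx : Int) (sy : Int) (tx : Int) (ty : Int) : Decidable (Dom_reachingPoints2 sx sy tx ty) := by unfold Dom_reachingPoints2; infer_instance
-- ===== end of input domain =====

-- B replaces A's modulo reverse-reduction by a single-step repeated-subtraction reverse walk
-- (slow Euclid) with the same post-loop checks; objective: alternative algorithm, not faster.

-- ===== PORT A =====
-- the while loop, with the standard fuel idiom; (tx+ty).toNat + 1 fuel is enough on Pre_
def pvLoopA (sx sy : Int) : Nat → Int → Int → Int × Int
  | 0, tx, ty => (tx, ty)
  | fuel + 1, tx, ty =>
    if sx < tx ∧ sy < ty then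
      if tx < ty then pvLoopA sx sy fuel tx (PySem.Int.mod ty tx)
      else pvLoopA sx sy fuel (PySem.Int.mod tx ty) ty
    else (tx, ty)

def reachingPoints2 (sx : Int) (sy : Int) (tx : Int) (ty : Int) : Bool :=
  let p := pvLoopA sx sy ((tx + ty).toNat + 1) tx ty
  if sx = p.1 ∧ sy ≤ p.2 ∧ PySem.Int.mod (p.2 - sy) sx = 0 then true
  else if sy = p.2 ∧ sx ≤ p.1 ∧ PySem.Int.mod (p.1 - sx) sy = 0 then true
  else false

-- ===== PORT B =====
-- B's final boolean-expression return
def pvDoneB (sx sy tx ty : Int) : Bool :=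
  (decide (sx = tx) && decide (sy ≤ ty) && decide (PySem.Int.mod (ty - sy) sx = 0)) ||
  (decide (sy = ty) && decide (sx ≤ tx) && decide (PySem.Int.mod (tx - sx) sy = 0))

-- B's subtraction walk (fuel idiom as above), falling through to the return expression
def pvStepB (sx sy : Int) : Nat → Int → Int → Bool
  | 0, tx, ty => pvDoneB sx sy tx ty
  | fuel + 1, tx, ty =>
    if sx < tx ∧ sy < ty then
      if tx > ty then pvStepB sx sy fuel (tx - ty) ty
      else pvStepB sx sy fuel tx (ty - tx)
    else pvDoneB sx sy tx ty

def reachingPoints2_alt (sx : Int) (sy : Int) (tx : Int) (ty : Int) : Bool :=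
  pvStepB sx sy ((tx + ty).toNat + 1) tx ty

-- ===== PRECONDITION & SPEC =====
-- Pre_ excludes inputs with nonpositive sx or sy on which the reverse loop runs (there A can
-- raise ZeroDivisionError or loop forever and B's subtraction walk can diverge; on part of this
-- class A happens to return) and the loop-free corners where the post-loop checks divide by a
-- zero sx or sy (ZeroDivisionError in both programs).
def Pre_reachingPoints2 (sx : Int) (sy : Int) (tx : Int) (ty : Int) : Prop :=
  (1 ≤ sx ∧ 1 ≤ sy) ∨
  (¬(sx < tx ∧ sy < ty) ∧ ¬(sx = 0 ∧ sx = tx ∧ sy ≤ ty) ∧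
    ¬(sy = 0 ∧ sy = ty ∧ sx ≤ tx ∧ sx ≠ tx))
instance (sx : Int) (sy : Int) (tx : Int) (ty : Int) : Decidable (Pre_reachingPoints2 sx sy tx ty) := by
  unfold Pre_reachingPoints2; infer_instance

def pvWitness_reachingPoints2 : Int × Int × Int × Int := (1, 1, 3, 5)

def Spec_reachingPoints2 (sx : Int) (sy : Int) (tx : Int) (ty : Int) (out : Bool) : Prop := out = reachingPoints2_alt sx sy tx ty
instance (sx : Int) (sy : Int) (tx : Int) (ty : Int) (out : Bool) : Decidable (Spec_reachingPoints2 sx sy tx ty out) := by unfold Spec_reachingPoints2; infer_instance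

-- ===== CLAIM (what is proved, stated in full; the proofs are below) =====
def Claim_equal_reachingPoints2 : Prop := ∀ (sx : Int) (sy : Int) (tx : Int) (ty : Int), Dom_reachingPoints2 sx sy tx ty → Pre_reachingPoints2 sx sy tx ty → Spec_reachingPoints2 sx sy tx ty (reachingPoints2 sx sy tx ty)

-- ===== LEMMAS AND PROOFS =====

-- reference (well-founded) versions of the two loops, defined only for proofs;
-- the positivity of sx, sy is folded into the guard so that they are total
def runA (sx sy tx ty : Int) : Int × Int :=
  if h : 1 ≤ sx ∧ 1 ≤ sy ∧ sx < tx ∧ sy < ty then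
    if tx < ty then runA sx sy tx (PySem.Int.mod ty tx)
    else runA sx sy (PySem.Int.mod tx ty) ty
  else (tx, ty)
termination_by (tx + ty).toNat
decreasing_by
  · obtain ⟨h1, h2, h3, h4⟩ := h
    rw [PySem.Int.mod_eq_emod_of_pos (by omega : (0:Int) < tx)]
    have hnn := Int.emod_nonneg ty (by omega : tx ≠ 0)
    have hlt := Int.emod_lt_of_pos ty (by omega : (0:Int) < tx)
    omega
  · obtain ⟨h1, h2, h3, h4⟩ := h
    rw [PySem.Int.mod_eq_emod_of_pos (by omega : (0:Int) < ty)]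
    have hnn := Int.emod_nonneg tx (by omega : ty ≠ 0)
    have hlt := Int.emod_lt_of_pos tx (by omega : (0:Int) < ty)
    omega

def runB (sx sy tx ty : Int) : Int × Int :=
  if h : 1 ≤ sx ∧ 1 ≤ sy ∧ sx < tx ∧ sy < ty then
    if ty < tx then runB sx sy (tx - ty) ty
    else runB sx sy tx (ty - tx)
  else (tx, ty)
termination_by (tx + ty).toNat
decreasing_by
  · obtain ⟨h1, h2, h3, h4⟩ := h; omega
  · obtain ⟨h1, h2, h3, h4⟩ := h; omega

def pvRA (sx sy tx ty : Int) : Bool := pvDoneB sx sy (runA sx sy tx ty).1 (runA sx sy tx ty).2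
def pvRB (sx sy tx ty : Int) : Bool := pvDoneB sx sy (runB sx sy tx ty).1 (runB sx sy tx ty).2

lemma runA_stop (sx sy tx ty : Int) (h : ¬(1 ≤ sx ∧ 1 ≤ sy ∧ sx < tx ∧ sy < ty)) :
    runA sx sy tx ty = (tx, ty) := by rw [runA, dif_neg h]

lemma runB_stop (sx sy tx ty : Int) (h : ¬(1 ≤ sx ∧ 1 ≤ sy ∧ sx < tx ∧ sy < ty)) :
    runB sx sy tx ty = (tx, ty) := by rw [runB, dif_neg h]

lemma doneB_iff (sx sy tx ty : Int) :
    pvDoneB sx sy tx ty = true ↔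
      (sx = tx ∧ sy ≤ ty ∧ PySem.Int.mod (ty - sy) sx = 0) ∨
      (sy = ty ∧ sx ≤ tx ∧ PySem.Int.mod (tx - sx) sy = 0) := by
  simp [pvDoneB, and_assoc]

lemma doneB_eq_false (sx sy tx ty : Int)
    (hA : ¬(sx = tx ∧ sy ≤ ty ∧ PySem.Int.mod (ty - sy) sx = 0))
    (hB : ¬(sy = ty ∧ sx ≤ tx ∧ PySem.Int.mod (tx - sx) sy = 0)) :
    pvDoneB sx sy tx ty = false := by
  rw [← Bool.not_eq_true, doneB_iff]
  exact fun h => h.elim hA hB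

-- 0 < a < m means a % m = a ≠ 0 (the divisibility check in the exit expression fails)
lemma mod_pos_ne_zero {a m : Int} (h1 : 0 < a) (h2 : a < m) : PySem.Int.mod a m ≠ 0 := by
  rw [PySem.Int.mod_eq_emod_of_pos (by omega : (0:Int) < m), Int.emod_eq_of_lt (by omega) h2]
  omega

-- b ≤ a, 0 < b  ⇒  a % b + b ≤ a (the subtraction chain has an intermediate value ≥ b)
lemma emod_add_le {a b : Int} (hb : 0 < b) (hba : b ≤ a) : a % b + b ≤ a := by
  have h1 : 1 ≤ a / b := (Int.le_ediv_iff_mul_le hb).mpr (by omega)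
  have h2 := Int.ediv_add_emod a b
  nlinarith

-- B's subtraction chain on ty simulates one modulo step  ty %= tx  of A (or exits with false
-- if the chain's guard stops it early, before reaching ty % tx)
lemma subB_y : ∀ (n : Nat) (sx sy tx ty : Int), ty.toNat ≤ n →
    1 ≤ sx → 1 ≤ sy → sx < tx → sy < ty → tx ≤ ty →
    (PySem.Int.mod ty tx + tx ≤ sy → pvRB sx sy tx ty = false) ∧
    (sy < PySem.Int.mod ty tx + tx → pvRB sx sy tx ty = pvRB sx sy tx (PySem.Int.mod ty tx)) := by
  intro n
  induction n with
  | zero => intro sx sy tx ty hn hpx hpy h1 h2 h3; omega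
  | succ n ih =>
    intro sx sy tx ty hn hpx hpy h1 h2 h3
    have htx : 0 < tx := by omega
    have hmod : PySem.Int.mod ty tx = ty % tx := PySem.Int.mod_eq_emod_of_pos htx
    have hsub : (ty - tx) % tx = ty % tx := Int.sub_emod_right ty tx
    have hstep : pvRB sx sy tx ty = pvRB sx sy tx (ty - tx) := by
      unfold pvRB
      rw [runB, dif_pos ⟨hpx, hpy, h1, h2⟩, if_neg (by omega : ¬ ty < tx)]
    have hr0 : 0 ≤ ty % tx := Int.emod_nonneg ty (by omega)
    have hrlt : ty % tx < tx := Int.emod_lt_of_pos ty htx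
    rcases lt_or_ge (ty - tx) tx with hcase | hcase
    · -- the chain has arrived below tx: ty - tx is exactly ty % tx
      have hr : ty % tx = ty - tx := by
        rw [← hsub]; exact Int.emod_eq_of_lt (by omega) hcase
      constructor
      · intro hc; omega
      · intro _; rw [hstep, hmod, hr]
    · -- still at least tx: either the guard still holds and we recurse, or it stops early
      rcases lt_or_ge sy (ty - tx) with hguard | hguard
      · have := ih sx sy tx (ty - tx) (by omega) hpx hpy h1 hguard (by omega)
        rw [PySem.Int.mod_eq_emod_of_pos htx, hsub] at this
        refine ⟨fun hc => ?_, fun hc => ?_⟩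
        · rw [hstep]; exact this.1 (by omega)
        · rw [hstep, this.2 (by omega), hmod, ← hsub]
      · -- early stop: guard fails at (tx, ty - tx), and the exit expression is false there
        have hmid : ty % tx + tx ≤ ty - tx := by
          have := emod_add_le htx (by omega : tx ≤ ty - tx)
          rw [hsub] at this; omega
        have hstop : runB sx sy tx (ty - tx) = (tx, ty - tx) :=
          runB_stop _ _ _ _ (by rintro ⟨-, -, -, hh⟩; omega)
        have hfalse : pvRB sx sy tx (ty - tx) = false := by
          unfold pvRB
          rw [hstop]
          refine doneB_eq_false _ _ _ _ (by rintro ⟨hh, -, -⟩; omega) ?_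
          rintro ⟨he, -, hz⟩
          exact mod_pos_ne_zero (by omega) (by omega) hz
        exact ⟨fun _ => by rw [hstep]; exact hfalse, fun hc => by omega⟩

-- the mirror lemma: B's subtraction chain on tx simulates one modulo step  tx %= ty  of A
lemma subB_x : ∀ (n : Nat) (sx sy tx ty : Int), tx.toNat ≤ n →
    1 ≤ sx → 1 ≤ sy → sx < tx → sy < ty → ty < tx →
    (PySem.Int.mod tx ty + ty ≤ sx → pvRB sx sy tx ty = false) ∧
    (sx < PySem.Int.mod tx ty + ty → pvRB sx sy tx ty = pvRB sx sy (PySem.Int.mod tx ty) ty) := by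
  intro n
  induction n with
  | zero => intro sx sy tx ty hn hpx hpy h1 h2 h3; omega
  | succ n ih =>
    intro sx sy tx ty hn hpx hpy h1 h2 h3
    have hty : 0 < ty := by omega
    have hmod : PySem.Int.mod tx ty = tx % ty := PySem.Int.mod_eq_emod_of_pos hty
    have hsub : (tx - ty) % ty = tx % ty := Int.sub_emod_right tx ty
    have hstep : pvRB sx sy tx ty = pvRB sx sy (tx - ty) ty := by
      unfold pvRB
      rw [runB, dif_pos ⟨hpx, hpy, h1, h2⟩, if_pos h3]
    have hr0 : 0 ≤ tx % ty := Int.emod_nonneg tx (by omega)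
    have hrlt : tx % ty < ty := Int.emod_lt_of_pos tx hty
    rcases lt_trichotomy (tx - ty) ty with hcase | hcase | hcase
    · -- arrived below ty: tx - ty is exactly tx % ty
      have hr : tx % ty = tx - ty := by
        rw [← hsub]; exact Int.emod_eq_of_lt (by omega) hcase
      constructor
      · intro hc; omega
      · intro _; rw [hstep, hmod, hr]
    · -- the chain hits the tie (ty ∣ tx): B zeroes ty, but both outcomes are false
      have hr : tx % ty = 0 := by rw [← hsub, hcase]; exact Int.emod_self
      rcases lt_or_ge sx (tx - ty) with hguard | hguard
      · have htie : pvRB sx sy (tx - ty) ty = false := by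
          unfold pvRB
          rw [runB, dif_pos ⟨hpx, hpy, by omega, by omega⟩,
            if_neg (by omega : ¬ ty < tx - ty)]
          rw [runB_stop _ _ _ _ (by rintro ⟨-, -, -, hh⟩; omega)]
          refine doneB_eq_false _ _ _ _ (by rintro ⟨-, hh, -⟩; omega)
            (by rintro ⟨hh, -, -⟩; omega)
        refine ⟨fun hc => by omega, fun _ => ?_⟩
        have hzero : pvRB sx sy (PySem.Int.mod tx ty) ty = false := by
          unfold pvRB
          rw [hmod, hr, runB_stop _ _ _ _ (by rintro ⟨-, -, hh, -⟩; omega)]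
          refine doneB_eq_false _ _ _ _ (by rintro ⟨hh, -, -⟩; omega)
            (by rintro ⟨hh, -, -⟩; omega)
        rw [hstep, htie, hzero]
      · -- guard already fails at the tie state
        have hstop : pvRB sx sy (tx - ty) ty = false := by
          unfold pvRB
          rw [runB_stop _ _ _ _ (by rintro ⟨-, -, hh, -⟩; omega)]
          refine doneB_eq_false _ _ _ _ ?_ (by rintro ⟨hh, -, -⟩; omega)
          rintro ⟨he, -, hz⟩
          exact mod_pos_ne_zero (by omega) (by omega) hz
        exact ⟨fun _ => by rw [hstep]; exact hstop, fun hc => by omega⟩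
    · rcases lt_or_ge sx (tx - ty) with hguard | hguard
      · have := ih sx sy (tx - ty) ty (by omega) hpx hpy hguard h2 hcase
        rw [PySem.Int.mod_eq_emod_of_pos hty, hsub] at this
        refine ⟨fun hc => ?_, fun hc => ?_⟩
        · rw [hstep]; exact this.1 (by omega)
        · rw [hstep, this.2 (by omega), hmod, ← hsub]
      · -- early stop: guard fails at (tx - ty, ty), exit expression false there
        have hmid : tx % ty + ty ≤ tx - ty := by
          have := emod_add_le hty (by omega : ty ≤ tx - ty)
          rw [hsub] at this; omega
        have hstop : pvRB sx sy (tx - ty) ty = false := by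
          unfold pvRB
          rw [runB_stop _ _ _ _ (by rintro ⟨-, -, hh, -⟩; omega)]
          refine doneB_eq_false _ _ _ _ ?_ (by rintro ⟨hh, -, -⟩; omega)
          rintro ⟨he, -, hz⟩
          exact mod_pos_ne_zero (by omega) (by omega) hz
        exact ⟨fun _ => by rw [hstep]; exact hstop, fun hc => by omega⟩

-- the main correspondence: with positive sources, A's modulo walk and B's subtraction walk
-- lead to the same final boolean
lemma mainAB : ∀ (n : Nat) (sx sy tx ty : Int), (tx + ty).toNat ≤ n →
    1 ≤ sx → 1 ≤ sy → pvRA sx sy tx ty = pvRB sx sy tx ty := by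
  intro n
  induction n with
  | zero =>
    intro sx sy tx ty hn hpx hpy
    by_cases hg : sx < tx ∧ sy < ty
    · omega
    · unfold pvRA pvRB
      rw [runA_stop _ _ _ _ (by tauto), runB_stop _ _ _ _ (by tauto)]
  | succ n ih =>
    intro sx sy tx ty hn hpx hpy
    by_cases hg : sx < tx ∧ sy < ty
    · obtain ⟨h1, h2⟩ := hg
      rcases lt_trichotomy tx ty with hlt | heq | hgt
      · -- A does ty %= tx; B's chain on ty matches it (or both are false)
        have hmod : PySem.Int.mod ty tx = ty % tx :=
          PySem.Int.mod_eq_emod_of_pos (by omega)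
        have hr0 : 0 ≤ ty % tx := Int.emod_nonneg ty (by omega)
        have hrlt : ty % tx < tx := Int.emod_lt_of_pos ty (by omega)
        have hA : pvRA sx sy tx ty = pvRA sx sy tx (PySem.Int.mod ty tx) := by
          unfold pvRA
          rw [runA, dif_pos ⟨hpx, hpy, h1, h2⟩, if_pos hlt]
        have hsub := subB_y ty.toNat sx sy tx ty le_rfl hpx hpy h1 h2 (by omega)
        by_cases hc : PySem.Int.mod ty tx + tx ≤ sy
        · rw [hA, hsub.1 hc]
          unfold pvRA
          rw [runA_stop _ _ _ _ (by rintro ⟨-, -, -, hh⟩; rw [hmod] at hc; omega)]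
          refine doneB_eq_false _ _ _ _ (by rintro ⟨hh, -, -⟩; omega) ?_
          rintro ⟨hh, -, -⟩; rw [hmod] at hh hc; omega
        · rw [hA, hsub.2 (by omega)]
          exact ih sx sy tx (PySem.Int.mod ty tx) (by rw [hmod]; omega) hpx hpy
      · -- tie: A goes to (0, ty), B to (tx, 0); both exits are false
        have hA : pvRA sx sy tx ty = false := by
          unfold pvRA
          rw [runA, dif_pos ⟨hpx, hpy, h1, h2⟩, if_neg (by omega : ¬ tx < ty), heq,
            PySem.Int.mod_eq_emod_of_pos (by omega : (0:Int) < ty), Int.emod_self,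
            runA_stop _ _ _ _ (by rintro ⟨-, -, hh, -⟩; omega)]
          exact doneB_eq_false _ _ _ _ (by rintro ⟨hh, -, -⟩; omega)
            (by rintro ⟨hh, -, -⟩; omega)
        have hsub := subB_y ty.toNat sx sy tx ty le_rfl hpx hpy h1 h2 (by omega)
        have hmod : PySem.Int.mod ty tx = 0 := by
          rw [PySem.Int.mod_eq_emod_of_pos (by omega : (0:Int) < tx), heq, Int.emod_self]
        have hB : pvRB sx sy tx ty = false := by
          rw [hsub.2 (by omega), hmod]
          unfold pvRB
          rw [runB_stop _ _ _ _ (by rintro ⟨-, -, -, hh⟩; omega)]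
          exact doneB_eq_false _ _ _ _ (by rintro ⟨-, hh, -⟩; omega)
            (by rintro ⟨hh, -, -⟩; omega)
        rw [hA, hB]
      · -- A does tx %= ty; B's chain on tx matches it (or both are false)
        have hmod : PySem.Int.mod tx ty = tx % ty :=
          PySem.Int.mod_eq_emod_of_pos (by omega)
        have hr0 : 0 ≤ tx % ty := Int.emod_nonneg tx (by omega)
        have hrlt : tx % ty < ty := Int.emod_lt_of_pos tx (by omega)
        have hA : pvRA sx sy tx ty = pvRA sx sy (PySem.Int.mod tx ty) ty := by
          unfold pvRA
          rw [runA, dif_pos ⟨hpx, hpy, h1, h2⟩, if_neg (by omega : ¬ tx < ty)]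
        have hsub := subB_x tx.toNat sx sy tx ty le_rfl hpx hpy h1 h2 hgt
        by_cases hc : PySem.Int.mod tx ty + ty ≤ sx
        · rw [hA, hsub.1 hc]
          unfold pvRA
          rw [runA_stop _ _ _ _ (by rintro ⟨-, -, hh, -⟩; rw [hmod] at hc; omega)]
          refine doneB_eq_false _ _ _ _ ?_ (by rintro ⟨hh, -, -⟩; omega)
          rintro ⟨hh, -, -⟩; rw [hmod] at hh hc; omega
        · rw [hA, hsub.2 (by omega)]
          exact ih sx sy (PySem.Int.mod tx ty) ty (by rw [hmod]; omega) hpx hpy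
    · unfold pvRA pvRB
      rw [runA_stop _ _ _ _ (by tauto), runB_stop _ _ _ _ (by tauto)]

-- with positive sources and enough fuel, the fueled port loops agree with the references
lemma loopA_eq : ∀ (f : Nat) (sx sy tx ty : Int), 1 ≤ sx → 1 ≤ sy →
    (tx + ty).toNat ≤ f → pvLoopA sx sy f tx ty = runA sx sy tx ty := by
  intro f
  induction f with
  | zero =>
    intro sx sy tx ty hpx hpy hf
    by_cases hg : sx < tx ∧ sy < ty
    · omega
    · simp only [pvLoopA]
      rw [runA_stop _ _ _ _ (by tauto)]
  | succ f ih =>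
    intro sx sy tx ty hpx hpy hf
    by_cases hg : sx < tx ∧ sy < ty
    · obtain ⟨h1, h2⟩ := hg
      simp only [pvLoopA, if_pos (⟨h1, h2⟩ : sx < tx ∧ sy < ty)]
      rw [runA, dif_pos ⟨hpx, hpy, h1, h2⟩]
      by_cases hlt : tx < ty
      · rw [if_pos hlt, if_pos hlt]
        have hmod : PySem.Int.mod ty tx = ty % tx :=
          PySem.Int.mod_eq_emod_of_pos (by omega)
        have hr0 : 0 ≤ ty % tx := Int.emod_nonneg ty (by omega)
        have hrlt : ty % tx < tx := Int.emod_lt_of_pos ty (by omega)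
        exact ih sx sy tx _ hpx hpy (by rw [hmod]; omega)
      · rw [if_neg hlt, if_neg hlt]
        have hmod : PySem.Int.mod tx ty = tx % ty :=
          PySem.Int.mod_eq_emod_of_pos (by omega)
        have hr0 : 0 ≤ tx % ty := Int.emod_nonneg tx (by omega)
        have hrlt : tx % ty < ty := Int.emod_lt_of_pos tx (by omega)
        exact ih sx sy _ ty hpx hpy (by rw [hmod]; omega)
    · simp only [pvLoopA, if_neg hg]
      rw [runA_stop _ _ _ _ (by tauto)]

lemma stepB_eq : ∀ (f : Nat) (sx sy tx ty : Int), 1 ≤ sx → 1 ≤ sy →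
    (tx + ty).toNat ≤ f → pvStepB sx sy f tx ty = pvRB sx sy tx ty := by
  intro f
  induction f with
  | zero =>
    intro sx sy tx ty hpx hpy hf
    by_cases hg : sx < tx ∧ sy < ty
    · omega
    · simp only [pvStepB]
      unfold pvRB
      rw [runB_stop _ _ _ _ (by tauto)]
  | succ f ih =>
    intro sx sy tx ty hpx hpy hf
    by_cases hg : sx < tx ∧ sy < ty
    · obtain ⟨h1, h2⟩ := hg
      simp only [pvStepB, if_pos (⟨h1, h2⟩ : sx < tx ∧ sy < ty)]
      have hB : pvRB sx sy tx ty =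
          if ty < tx then pvRB sx sy (tx - ty) ty else pvRB sx sy tx (ty - tx) := by
        unfold pvRB
        rw [runB, dif_pos ⟨hpx, hpy, h1, h2⟩]
        by_cases hlt : ty < tx
        · rw [if_pos hlt, if_pos hlt]
        · rw [if_neg hlt, if_neg hlt]
      rw [hB]
      by_cases hlt : ty < tx
      · rw [if_pos hlt, if_pos hlt]
        exact ih sx sy (tx - ty) ty hpx hpy (by omega)
      · rw [if_neg hlt, if_neg hlt]
        exact ih sx sy tx (ty - tx) hpx hpy (by omega)
    · simp only [pvStepB, if_neg hg]
      unfold pvRB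
      rw [runB_stop _ _ _ _ (by tauto)]

-- A's post-loop if/return chain computes the same boolean as B's single return expression
lemma chainA_eq (sx sy p q : Int) :
    (if sx = p ∧ sy ≤ q ∧ PySem.Int.mod (q - sy) sx = 0 then true
     else if sy = q ∧ sx ≤ p ∧ PySem.Int.mod (p - sx) sy = 0 then true
     else false) = pvDoneB sx sy p q := by
  by_cases hA : sx = p ∧ sy ≤ q ∧ PySem.Int.mod (q - sy) sx = 0
  · rw [if_pos hA, eq_comm, doneB_iff]; exact Or.inl hA
  · rw [if_neg hA]
    by_cases hB : sy = q ∧ sx ≤ p ∧ PySem.Int.mod (p - sx) sy = 0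
    · rw [if_pos hB, eq_comm, doneB_iff]; exact Or.inr hB
    · rw [if_neg hB, eq_comm, doneB_eq_false _ _ _ _ hA hB]

-- ===== VERDICT (by name: the statement is the Claim_ definition above) =====
theorem reachingPoints2_spec : Claim_equal_reachingPoints2 := by
  unfold Claim_equal_reachingPoints2
  intro sx sy tx ty _hdom hpre
  unfold Spec_reachingPoints2 reachingPoints2 reachingPoints2_alt
  rcases hpre with ⟨hpx, hpy⟩ | ⟨hg, -, -⟩
  · rw [loopA_eq _ _ _ _ _ hpx hpy (by omega),
      stepB_eq _ _ _ _ _ hpx hpy (by omega), chainA_eq]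
    have h := mainAB (tx + ty).toNat sx sy tx ty le_rfl hpx hpy
    unfold pvRA at h
    exact h
  · simp only [pvLoopA, pvStepB, if_neg hg]
    exact chainA_eq sx sy tx ty
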